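-- pv_equiv track=rewrite | github.com/Alexey-Ershov/UneexPython | homework5/words_shuffle.py | parseAndSort
-- ===== SOURCE A (Python) =====
-- def parseAndSort(words):
--     punct_chars = {'.', '?', '!', ':', ';', ',', '-', '(', ')', '"'}
--
--     i = 0
--     was_cut = False
--     list_len = len(words)
--     while i < list_len:
--         if not was_cut:
--             words[i] = words[i].lower()
--
--         else:
--             was_cut = False
--
--         word = words[i]
--         for index, char in enumerate(word):
--             if char in punct_chars:
--                 if char == '.' and word[index + 1:index + 3] == '..':
--                     char = '...'
--                     tail_index = index + 3
--
--                 else: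
--                     tail_index = index + 1
--
--                 head = word[:index]
--                 if head:
--                     words.append(head)
--
--                 tail = word[tail_index:]
--                 if tail:
--                     words[i] = tail
--                     words.append(char)
--                     was_cut = True
--                     break
--
--                 else:
--                     words[i] = char
--                     if tail_index - index == 3:
--                         break
--
--         if was_cut:
--             continue
--
--         else:
--             i += 1
--
--     words.sort()
--     return words
-- ===== SOURCE B (Python) =====
-- # Single-pass tokenizer: scan each lowercased word left to right into a flat
-- # token list, sort once, and write the result back into the argument in place.
-- def parseAndSort(words):
--     punct = set('.?!:;,-()"')
--     tokens = []
--     for w in words: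
--         w = w.lower()
--         if not w:
--             tokens.append(w)
--             continue
--         i = 0
--         n = len(w)
--         while i < n:
--             if w[i] in punct:
--                 if w[i] == '.' and w[i + 1:i + 3] == '..':
--                     tokens.append('...')
--                     i += 3
--                 else:
--                     tokens.append(w[i])
--                     i += 1
--             else:
--                 j = i
--                 while j < n and w[j] not in punct:
--                     j += 1
--                 tokens.append(w[i:j])
--                 i = j
--     tokens.sort()
--     words[:] = tokens
--     return words
-- ===== Notes on version B (the rewrite author's own statement) =====
-- stated objective: simpler
-- what changed: A tokenizes by repeatedly mutating the word list in place (rewriting slot i to the tail and appending head/punctuation tokens at the end, re-scanning each remainder from index 0 under a was_cut flag); B replaces that with a single left-to-right scanner per word that emits maximal non-punctuation runs, single punctuation characters and three-dot groups into one flat token list, then sorts once.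
import Mathlib
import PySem

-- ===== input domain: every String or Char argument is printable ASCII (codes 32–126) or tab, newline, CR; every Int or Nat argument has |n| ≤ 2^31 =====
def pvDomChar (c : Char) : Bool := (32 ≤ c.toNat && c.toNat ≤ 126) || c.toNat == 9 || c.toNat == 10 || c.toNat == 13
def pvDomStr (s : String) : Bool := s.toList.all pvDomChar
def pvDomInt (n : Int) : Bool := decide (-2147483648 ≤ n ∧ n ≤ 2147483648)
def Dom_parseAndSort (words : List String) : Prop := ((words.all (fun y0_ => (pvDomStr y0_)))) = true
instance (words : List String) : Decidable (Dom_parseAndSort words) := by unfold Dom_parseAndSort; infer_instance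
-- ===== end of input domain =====

-- B replaces A's in-place cut-and-append rewriting of the word list by a single
-- left-to-right tokenizing scan per word into one flat list, sorted once (objective: simpler).
-- Both Pythons mutate the argument list in place to the same final (sorted) content;
-- the theorems here are about the returned value.

-- ===== PORT A =====
-- general list-access helpers the termination argument of the loop cites by name
theorem pv_getD_append_left {α : Type} (l₁ l₂ : List α) (n : Nat) (d : α) (h : n < l₁.length) :
    (l₁ ++ l₂).getD n d = l₁.getD n d := by
  simp [List.getD_eq_getElem?_getD, List.getElem?_append_left h]

theorem pv_getD_set_self {α : Type} (l : List α) (n : Nat) (a d : α) (h : n < l.length) :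
    (l.set n a).getD n d = a := by
  simp [List.getD_eq_getElem?_getD, h]

theorem pv_getD_out {α : Type} (l : List α) (n : Nat) (d : α) (h : l.length ≤ n) :
    l.getD n d = d := by
  simp [List.getD_eq_getElem?_getD, List.getElem?_eq_none h]

theorem pv_lower_toList_length (s : String) :
    (PySem.Str.lower s).toList.length = s.toList.length := by
  simp [PySem.Chars.lower]

-- the `char in punct_chars` membership test
def punctA (c : Char) : Bool :=
  c == '.' || c == '?' || c == '!' || c == ':' || c == ';' || c == ',' || c == '-' || c == '(' || c == ')' || c == '"'

-- A's inner `for index, char in enumerate(word)` loop: it scans for the first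
-- punctuation character and in every branch either breaks or has already reached
-- the end of the word, so it is exactly the search for the first punctuation position.
def findPunct : List Char → Nat → Option (Nat × Char)
  | [], _ => none
  | c :: rest, idx => if punctA c then some (idx, c) else findPunct rest (idx + 1)

-- A's `while i < list_len` loop over the mutable list `ws` (list_len is captured
-- before the loop, so tokens appended at the end are never revisited).
def pLoop (listLen : Nat) (ws : List String) (i : Nat) (wasCut : Bool) : List String :=
  if hi : i < listLen then
    -- `if not was_cut: words[i] = words[i].lower()`
    let ws1 := if wasCut then ws else ws.set i (PySem.Str.lower (ws.getD i ""))
    match findPunct (ws1.getD i "").toList 0 with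
    | none => pLoop listLen ws1 (i + 1) false
    | some (index, c) =>
      -- `if char == '.' and word[index+1:index+3] == '..'` (slice = drop/take)
      let threeDots := c == '.' && (((ws1.getD i "").toList.drop (index + 1)).take 2 == ['.', '.'])
      let ch : List Char := if threeDots then ['.', '.', '.'] else [c]
      let tailIndex := if threeDots then index + 3 else index + 1
      let head := (ws1.getD i "").toList.take index
      -- `if head: words.append(head)`
      let ws2 := if head ≠ [] then ws1 ++ [String.ofList head] else ws1
      if (ws1.getD i "").toList.drop tailIndex ≠ [] then
        -- `words[i] = tail; words.append(char); was_cut = True; break`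
        pLoop listLen ((ws2.set i (String.ofList ((ws1.getD i "").toList.drop tailIndex))) ++ [String.ofList ch]) i true
      else
        -- `words[i] = char` (and the scan is over / breaks)
        pLoop listLen (ws2.set i (String.ofList ch)) (i + 1) false
  else ws
termination_by (listLen - i, (ws.getD i "").toList.length)
decreasing_by
  · exact Prod.Lex.left _ _ (by omega)
  · apply Prod.Lex.right
    rename_i hdrop
    have hwne : (ws1.getD i "").toList ≠ [] := by
      intro hnil; rw [hnil] at hdrop; simp at hdrop
    have h1 : i < ws1.length := by
      by_contra hle
      exact hwne (by rw [pv_getD_out _ _ _ (by omega)]; rfl)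
    have h2 : i < ws2.length := by
      have : ws1.length ≤ ws2.length := by
        simp only [ws2]; split <;> simp
      omega
    have hlen : (ws1.getD i "").toList.length = (ws.getD i "").toList.length := by
      simp only [ws1]; split
      · rfl
      · by_cases hiw : i < ws.length
        · rw [pv_getD_set_self _ _ _ _ hiw]; exact pv_lower_toList_length _
        · rw [pv_getD_out _ _ _ (by simpa using (by omega : ws.length ≤ i)),
             pv_getD_out _ _ _ (by omega)]
    have hti : 1 ≤ tailIndex := by simp only [tailIndex]; split <;> omega
    have hg : (((ws2.set i (String.ofList ((ws1.getD i "").toList.drop tailIndex))) ++ [String.ofList ch]).getD i "") =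
        String.ofList ((ws1.getD i "").toList.drop tailIndex) := by
      rw [pv_getD_append_left _ _ _ _ (by simpa using h2), pv_getD_set_self _ _ _ _ (by simpa using h2)]
    show (((ws2.set i (String.ofList ((ws1.getD i "").toList.drop tailIndex))) ++ [String.ofList ch]).getD i "").toList.length
        < (ws.getD i "").toList.length
    rw [hg]
    have hwpos : 0 < (ws1.getD i "").toList.length := List.length_pos_iff.mpr hwne
    simp only [String.toList_ofList, List.length_drop]
    omega
  · exact Prod.Lex.left _ _ (by omega)

def parseAndSort (words : List String) : List String :=
  -- `words.sort(); return words`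
  PySem.List.sorted (pLoop words.length words 0 false) (fun x => x)

-- ===== PORT B =====
-- Source B's punctuation set
def punctB (c : Char) : Bool :=
  ['.', '?', '!', ':', ';', ',', '-', '(', ')', '"'].contains c

-- Source B's `while i < n` scanner over one (already lowercased) word
def scanB : List Char → List String
  | [] => []
  | c :: rest =>
    if hp : punctB c then
      if c == '.' && (rest.take 2 == ['.', '.']) then
        -- `tokens.append('...'); i += 3`
        String.ofList ['.', '.', '.'] :: scanB (rest.drop 2)
      else
        -- `tokens.append(w[i]); i += 1`
        String.ofList [c] :: scanB rest
    else
      -- inner `while j < n and w[j] not in punct` run, then `tokens.append(w[i:j]); i = j`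
      String.ofList ((c :: rest).takeWhile (fun x => !punctB x)) ::
        scanB ((c :: rest).dropWhile (fun x => !punctB x))
termination_by w => w.length
decreasing_by
  · simp
  · simp
  · have h1 : (List.dropWhile (fun x => !punctB x) (c :: rest)) = List.dropWhile (fun x => !punctB x) rest := by
      simp [hp]
    simp only [h1, List.length_cons]
    exact Nat.lt_succ_of_le (List.length_dropWhile_le _ _)

def parseAndSort_alt (words : List String) : List String :=
  let tokens := words.foldl (fun acc w =>
    if PySem.Str.lower w = "" then acc ++ [PySem.Str.lower w]
    else acc ++ scanB (PySem.Str.lower w).toList) []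
  -- `tokens.sort(); words[:] = tokens; return words`
  PySem.List.sorted tokens (fun x => x)

-- ===== PRECONDITION & SPEC =====
def Spec_parseAndSort (words : List String) (out : List String) : Prop := out = parseAndSort_alt words
instance (words : List String) (out : List String) : Decidable (Spec_parseAndSort words out) := by unfold Spec_parseAndSort; infer_instance

-- ===== CLAIM (what is proved, stated in full; the proofs are below) =====
def Claim_equal_parseAndSort : Prop := ∀ (words : List String), Dom_parseAndSort words → Spec_parseAndSort words (parseAndSort words)

-- ===== LEMMAS AND PROOFS =====

theorem punctB_eq (c : Char) : punctB c = punctA c := by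
  simp only [punctB, punctA, List.contains_cons, List.contains_nil, Bool.or_false]
  simp [Bool.or_assoc]

theorem punctB_fun_eq : (fun x => !punctB x) = (fun x => !punctA x) := by
  funext x; rw [punctB_eq]

-- the per-word token list both programs produce (proof-only middle ground)
def toks (w : List Char) : List String :=
  if w = [] then [String.ofList w] else scanB w

theorem findPunct_none_decomp (w : List Char) (idx : Nat) (h : findPunct w idx = none) :
    w.takeWhile (fun x => !punctA x) = w := by
  induction w generalizing idx with
  | nil => rfl
  | cons a rest ih =>
    simp only [findPunct] at h
    by_cases ha : punctA a
    · rw [if_pos ha] at h; cases h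
    · rw [if_neg ha] at h
      simp [ha, ih _ h]

theorem findPunct_some_decomp (w : List Char) (idx index : Nat) (c : Char)
    (h : findPunct w idx = some (index, c)) :
    punctA c = true ∧ ∃ t, w = w.takeWhile (fun x => !punctA x) ++ c :: t ∧
      index = idx + (w.takeWhile (fun x => !punctA x)).length := by
  induction w generalizing idx with
  | nil => simp [findPunct] at h
  | cons a rest ih =>
    simp only [findPunct] at h
    by_cases ha : punctA a
    · rw [if_pos ha] at h
      obtain ⟨rfl, rfl⟩ : idx = index ∧ a = c := by simpa [Prod.ext_iff] using h
      refine ⟨ha, rest, ?_, ?_⟩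
      · simp [ha]
      · simp [ha]
    · rw [if_neg ha] at h
      obtain ⟨hp, t, hw, hidx⟩ := ih _ h
      refine ⟨hp, t, ?_, ?_⟩
      · simp only [List.takeWhile_cons, ha, Bool.not_false, if_true]
        conv_lhs => rw [hw]
        simp
      · simp only [List.takeWhile_cons, ha, Bool.not_false, if_true, List.length_cons]
        omega

theorem scanB_no_punct (w : List Char) (hw : w ≠ []) (h : findPunct w 0 = none) :
    scanB w = [String.ofList w] := by
  obtain ⟨a, rest, rfl⟩ : ∃ a rest, w = a :: rest := by
    cases w with
    | nil => exact absurd rfl hw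
    | cons a rest => exact ⟨a, rest, rfl⟩
  have ha : punctA a = false := by
    by_contra hx
    simp only [findPunct, Bool.not_eq_false] at h hx
    rw [if_pos hx] at h; cases h
  have htw := findPunct_none_decomp _ _ h
  have hdw : (a :: rest).dropWhile (fun x => !punctA x) = [] := by
    have := List.takeWhile_append_dropWhile (p := fun x => !punctA x) (l := a :: rest)
    rw [htw] at this
    simpa using this
  rw [scanB]
  rw [dif_neg (by rw [punctB_eq]; simp [ha])]
  rw [punctB_fun_eq, htw, hdw]
  simp [scanB]

theorem scanB_first (w : List Char) (index : Nat) (c : Char)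
    (hf : findPunct w 0 = some (index, c)) :
    scanB w =
      (if w.take index ≠ [] then [String.ofList (w.take index)] else []) ++
      [String.ofList (if c == '.' && ((w.drop (index + 1)).take 2 == ['.', '.']) then ['.', '.', '.'] else [c])] ++
      scanB (w.drop (if c == '.' && ((w.drop (index + 1)).take 2 == ['.', '.']) then index + 3 else index + 1)) := by
  obtain ⟨hp, t, hw, hidx⟩ := findPunct_some_decomp _ _ _ _ hf
  set tw := w.takeWhile (fun x => !punctA x) with htw
  have hidx' : index = tw.length := by omega
  have htake : w.take index = tw := by
    rw [hidx']; conv_lhs => rw [hw]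
    exact List.take_left ..
  have hdrop : w.drop index = c :: t := by
    rw [hidx']; conv_lhs => rw [hw]
    exact List.drop_left ..
  have hdrop1 : w.drop (index + 1) = t := by
    have hq := congrArg (List.drop 1) hdrop
    rw [List.drop_drop] at hq
    simpa using hq
  have hdrop3 : w.drop (index + 3) = t.drop 2 := by
    have hq := congrArg (List.drop 3) hdrop
    rw [List.drop_drop] at hq
    simpa using hq
  have hscant : scanB (c :: t) =
      [String.ofList (if c == '.' && (t.take 2 == ['.', '.']) then ['.', '.', '.'] else [c])] ++
      scanB (if c == '.' && (t.take 2 == ['.', '.']) then t.drop 2 else t) := by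
    rw [scanB, dif_pos (by rw [punctB_eq]; exact hp)]
    by_cases h3 : c == '.' && (t.take 2 == ['.', '.'])
    · rw [if_pos h3, if_pos h3, if_pos h3]; rfl
    · rw [if_neg h3, if_neg h3, if_neg h3]; rfl
  by_cases h0 : index = 0
  · -- word starts with the punctuation character
    have htw0 : tw = [] := by rw [← List.length_eq_zero_iff]; omega
    have hw0 : w = c :: t := by conv_lhs => rw [hw, htw0, List.nil_append]
    rw [hw0, h0, hscant]
    by_cases h3 : (c == '.' && (t.take 2 == ['.', '.'])) <;>
      simp [h3, List.drop_succ_cons]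
  · -- a non-empty non-punctuation head comes first
    have htwne : tw ≠ [] := by
      intro hx; rw [hx] at hidx'; simp at hidx'; omega
    have hane : w ≠ [] := by rw [hw]; simp
    obtain ⟨a, rest, rfl⟩ : ∃ a rest, w = a :: rest := by
      cases w with
      | nil => exact absurd rfl hane
      | cons a rest => exact ⟨a, rest, rfl⟩
    have ha : punctA a = false := by
      cases hq : tw with
      | nil =>
        rw [hq] at hidx'
        simp at hidx'
        exact absurd hidx' h0
      | cons b tb =>
        have h2 := hw
        rw [hq, List.cons_append] at h2
        injection h2 with hba _
        have hmem : a ∈ List.takeWhile (fun x => !punctA x) (a :: rest) := by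
          rw [← htw, hq, ← hba]; simp
        have := List.mem_takeWhile_imp hmem
        simpa using this
    have hdw : (a :: rest).dropWhile (fun x => !punctA x) = c :: t := by
      apply List.append_cancel_left (as := tw)
      rw [htw, List.takeWhile_append_dropWhile, ← htw]
      exact hw
    rw [scanB, dif_neg (by rw [punctB_eq]; simp [ha])]
    rw [punctB_fun_eq, ← htw, hdw, hscant]
    rw [htake, hdrop1, if_pos htwne]
    by_cases h3 : (c == '.' && (t.take 2 == ['.', '.'])) = true
    · rw [if_pos h3, if_pos h3, if_pos h3, hdrop3]
      simp
    · rw [if_neg h3, if_neg h3, if_neg h3, hdrop1]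
      simp

theorem pv_take_succ_set (l : List String) (i : Nat) (a : String) (h : i < l.length) :
    (l.set i a).take (i + 1) = l.take i ++ [a] := by
  rw [List.set_eq_take_cons_drop _ h, List.take_append]
  simp [List.take_take]
  rw [show i + 1 - min i l.length = 1 from by omega]
  simp

theorem pv_drop_set (l : List String) (i m : Nat) (a : String) (h : i < m) :
    (l.set i a).drop m = l.drop m := by
  rw [List.drop_set]
  simp [show ¬ (m ≤ i) from by omega]

theorem pv_getD_ne_lt (l : List String) (i : Nat) (h : l.getD i "" ≠ "") : i < l.length := by
  by_contra hle
  exact h (pv_getD_out _ _ _ (by omega))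

theorem pv_toList_ne_lt (l : List String) (i : Nat) (h : (l.getD i "").toList ≠ []) :
    i < l.length := by
  apply pv_getD_ne_lt
  intro hx; rw [hx] at h; exact h rfl

theorem pv_set_self (l : List String) (i : Nat) (h : (l.getD i "").toList = []) :
    l.set i "" = l := by
  by_cases hiw : i < l.length
  · have h1 : l.getD i "" = l[i] := by simp [List.getD_eq_getElem?_getD, hiw]
    have h2 : l[i] = "" := by
      have hq := congrArg String.ofList h
      rw [String.ofList_toList, String.ofList_nil, h1] at hq
      exact hq
    rw [← h2]
    exact List.set_getElem_self hiw
  · exact List.set_eq_of_length_le (by omega)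

theorem pLoop_lower (listLen : Nat) (ws : List String) (i : Nat) (hi : i < listLen) :
    pLoop listLen ws i false = pLoop listLen (ws.set i (PySem.Str.lower (ws.getD i ""))) i true := by
  conv_lhs => rw [pLoop.eq_def]
  conv_rhs => rw [pLoop.eq_def]
  simp only [dif_pos hi, Bool.false_eq_true, if_false, if_true]

-- processing slot i when its word is empty: nothing happens
theorem pLoop_chain_nil (listLen : Nat) (ws : List String) (i : Nat) (hi : i < listLen)
    (hw : (ws.getD i "").toList = []) :
    pLoop listLen ws i true = pLoop listLen ((ws.set i "") ++ []) (i + 1) false := by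
  rw [List.append_nil, pv_set_self _ _ hw]
  rw [pLoop.eq_def]
  simp only [dif_pos hi, if_true]
  rw [hw]
  simp [findPunct]

-- one iteration of A's loop when the current word contains punctuation
theorem pLoop_step (listLen : Nat) (ws : List String) (i : Nat) (hi : i < listLen)
    (index : Nat) (c : Char)
    (hf : findPunct (ws.getD i "").toList 0 = some (index, c)) :
    pLoop listLen ws i true =
      (if (ws.getD i "").toList.drop
            (if (c == '.' && (((ws.getD i "").toList.drop (index + 1)).take 2 == ['.', '.'])) then index + 3 else index + 1) ≠ [] then
        pLoop listLen
          (((if (ws.getD i "").toList.take index ≠ [] then ws ++ [String.ofList ((ws.getD i "").toList.take index)] else ws).set i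
              (String.ofList ((ws.getD i "").toList.drop
                (if (c == '.' && (((ws.getD i "").toList.drop (index + 1)).take 2 == ['.', '.'])) then index + 3 else index + 1)))) ++
            [String.ofList (if (c == '.' && (((ws.getD i "").toList.drop (index + 1)).take 2 == ['.', '.'])) then ['.', '.', '.'] else [c])])
          i true
      else
        pLoop listLen
          ((if (ws.getD i "").toList.take index ≠ [] then ws ++ [String.ofList ((ws.getD i "").toList.take index)] else ws).set i
            (String.ofList (if (c == '.' && (((ws.getD i "").toList.drop (index + 1)).take 2 == ['.', '.'])) then ['.', '.', '.'] else [c])))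
          (i + 1) false) := by
  conv_lhs => rw [pLoop.eq_def]
  simp only [dif_pos hi, if_true, hf]

-- the whole cut-chain on slot i: the final slot value is the last token, the other
-- tokens are appended at the end of the list, in order
theorem pLoop_chain (listLen n : Nat) : ∀ (w : List Char) (ws : List String) (i : Nat),
    w.length ≤ n → i < listLen → (ws.getD i "").toList = w →
    ∃ ap fin, toks w = ap ++ [fin] ∧
      pLoop listLen ws i true = pLoop listLen ((ws.set i fin) ++ ap) (i + 1) false := by
  induction n with
  | zero =>
    intro w ws i hn hi hw
    have hnil : w = [] := by
      cases w with
      | nil => rfl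
      | cons a r => simp at hn
    subst hnil
    exact ⟨[], "", by simp [toks], pLoop_chain_nil _ _ _ hi hw⟩
  | succ n ih =>
    intro w ws i hn hi hw
    by_cases hnil : w = []
    · subst hnil
      exact ⟨[], "", by simp [toks], pLoop_chain_nil _ _ _ hi hw⟩
    have hiw : i < ws.length := pv_toList_ne_lt _ _ (by rw [hw]; exact hnil)
    cases hf : findPunct w 0 with
    | none =>
      refine ⟨[], String.ofList w, by simp [toks, hnil, scanB_no_punct _ hnil hf], ?_⟩
      have hset : (ws.set i (String.ofList w)) ++ [] = ws := by
        rw [List.append_nil, ← hw, String.ofList_toList]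
        have h1 : ws.getD i "" = ws[i] := by simp [List.getD_eq_getElem?_getD, hiw]
        rw [h1]
        exact List.set_getElem_self hiw
      rw [hset, pLoop.eq_def]
      simp only [dif_pos hi, if_true]
      rw [hw]
      simp [hf]
    | some ic =>
      obtain ⟨index, c⟩ := ic
      have hf' : findPunct (ws.getD i "").toList 0 = some (index, c) := by rw [hw]; exact hf
      have hstep := pLoop_step listLen ws i hi index c hf'
      rw [hw] at hstep
      by_cases htl : w.drop (if (c == '.' && ((w.drop (index + 1)).take 2 == ['.', '.'])) then index + 3 else index + 1) = []
      · -- the tail is empty: the chain ends here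
        refine ⟨(if w.take index ≠ [] then [String.ofList (w.take index)] else []),
          String.ofList (if (c == '.' && ((w.drop (index + 1)).take 2 == ['.', '.'])) then ['.', '.', '.'] else [c]), ?_, ?_⟩
        · rw [toks, if_neg hnil, scanB_first _ _ _ hf, htl]
          simp [scanB]
        · rw [hstep, if_neg (not_not_intro htl)]
          congr 1
          by_cases hh : w.take index ≠ []
          · rw [if_pos hh, if_pos hh, List.set_append_left _ _ hiw]
          · rw [if_neg hh, if_neg hh, List.append_nil]
      · -- the tail is not empty: the loop continues on slot i with the tail
        have hn' : (w.drop (if (c == '.' && ((w.drop (index + 1)).take 2 == ['.', '.'])) then index + 3 else index + 1)).length ≤ n := by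
          have hp1 : 1 ≤ (if (c == '.' && ((w.drop (index + 1)).take 2 == ['.', '.'])) then index + 3 else index + 1) := by
            split <;> omega
          have hp2 : 1 ≤ w.length := by
            cases w with
            | nil => exact absurd rfl hnil
            | cons a r => simp
          simp only [List.length_drop]
          omega
        have h2 : i < (if w.take index ≠ [] then ws ++ [String.ofList (w.take index)] else ws).length := by
          split
          · simp only [List.length_append, List.length_cons, List.length_nil]
            omega
          · omega
        have hgetD : ((((if w.take index ≠ [] then ws ++ [String.ofList (w.take index)] else ws).set i
              (String.ofList (w.drop (if (c == '.' && ((w.drop (index + 1)).take 2 == ['.', '.'])) then index + 3 else index + 1)))) ++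
            [String.ofList (if (c == '.' && ((w.drop (index + 1)).take 2 == ['.', '.'])) then ['.', '.', '.'] else [c])]).getD i "").toList =
            w.drop (if (c == '.' && ((w.drop (index + 1)).take 2 == ['.', '.'])) then index + 3 else index + 1) := by
          rw [pv_getD_append_left _ _ _ _ (by simpa using h2), pv_getD_set_self _ _ _ _ (by simpa using h2)]
          exact String.toList_ofList
        obtain ⟨ap', fin', htoks', heq'⟩ := ih _ _ i hn' hi hgetD
        refine ⟨(if w.take index ≠ [] then [String.ofList (w.take index)] else []) ++
          [String.ofList (if (c == '.' && ((w.drop (index + 1)).take 2 == ['.', '.'])) then ['.', '.', '.'] else [c])] ++ ap', fin', ?_, ?_⟩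
        · rw [toks, if_neg hnil, scanB_first _ _ _ hf]
          rw [toks, if_neg htl] at htoks'
          rw [htoks']
          simp [List.append_assoc]
        · rw [hstep, if_pos htl, heq']
          congr 1
          rw [List.set_append_left _ _ (by simpa using h2), List.set_set]
          by_cases hh : w.take index ≠ []
          · rw [if_pos hh, if_pos hh, List.set_append_left _ _ hiw]
            simp [List.append_assoc]
          · rw [if_neg hh, if_neg hh]
            simp [List.append_assoc]

theorem pLoop_perm (listLen : Nat) : ∀ (k : Nat) (ws : List String) (i : Nat),
    i + k = listLen → listLen ≤ ws.length →
    (pLoop listLen ws i false).Perm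
      (ws.take i ++ ((ws.drop i).take k).flatMap (fun s => toks (PySem.Str.lower s).toList) ++ ws.drop listLen) := by
  intro k
  induction k with
  | zero =>
    intro ws i hik hlen
    rw [pLoop.eq_def, dif_neg (by omega)]
    simp only [List.take_zero, List.flatMap_nil, List.append_nil]
    rw [show i = listLen from by omega]
    rw [List.take_append_drop]
  | succ k ih =>
    intro ws i hik hlen
    have hi : i < listLen := by omega
    have hiw : i < ws.length := by omega
    rw [pLoop_lower _ _ _ hi]
    set lw := PySem.Str.lower (ws.getD i "") with hlw
    have hgetD : ((ws.set i lw).getD i "").toList = lw.toList := by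
      rw [pv_getD_set_self _ _ _ _ hiw]
    obtain ⟨ap, fin, htoks, heq⟩ :=
      pLoop_chain listLen lw.toList.length lw.toList (ws.set i lw) i (le_refl _) hi hgetD
    rw [heq, List.set_set]
    have hIH := ih ((ws.set i fin) ++ ap) (i + 1) (by omega)
      (by simp only [List.length_append, List.length_set]; omega)
    refine hIH.trans ?_
    have e1 : ((ws.set i fin) ++ ap).take (i + 1) = ws.take i ++ [fin] := by
      rw [List.take_append_of_le_length (by simp only [List.length_set]; omega),
        pv_take_succ_set _ _ _ hiw]
    have e2 : (((ws.set i fin) ++ ap).drop (i + 1)).take k = (ws.drop (i + 1)).take k := by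
      rw [List.drop_append, pv_drop_set _ _ _ _ (by omega : i < i + 1),
        List.take_append_of_le_length (by simp only [List.length_drop]; omega)]
    have e3 : ((ws.set i fin) ++ ap).drop listLen = ws.drop listLen ++ ap := by
      rw [List.drop_append, pv_drop_set _ _ _ _ hi, List.length_set,
        show listLen - ws.length = 0 from by omega, List.drop_zero]
    have e4 : ws.drop i = ws[i] :: ws.drop (i + 1) := List.drop_eq_getElem_cons hiw
    have e5 : toks (PySem.Str.lower ws[i]).toList = ap ++ [fin] := by
      have hg : ws.getD i "" = ws[i] := by simp [List.getD_eq_getElem?_getD, hiw]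
      rw [← hg, ← hlw]
      exact htoks
    rw [e1, e2, e3, e4, List.take_succ_cons, List.flatMap_cons, e5]
    refine List.perm_iff_count.mpr ?_
    intro a
    simp only [List.count_append, List.count_cons, List.count_nil]
    omega

theorem alt_tokens_eq (words : List String) :
    words.foldl (fun acc w =>
      if PySem.Str.lower w = "" then acc ++ [PySem.Str.lower w]
      else acc ++ scanB (PySem.Str.lower w).toList) [] =
    words.flatMap (fun s => toks (PySem.Str.lower s).toList) := by
  have hfun : (fun (acc : List String) w =>
      if PySem.Str.lower w = "" then acc ++ [PySem.Str.lower w]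
      else acc ++ scanB (PySem.Str.lower w).toList)
      = (fun acc w => acc ++ toks (PySem.Str.lower w).toList) := by
    funext acc w
    by_cases h : PySem.Str.lower w = ""
    · rw [if_pos h, h]
      simp [toks]
    · have hne : (PySem.Str.lower w).toList ≠ [] := by
        intro hx
        apply h
        have hy := congrArg String.ofList hx
        rwa [String.ofList_toList, String.ofList_nil] at hy
      rw [if_neg h]
      unfold toks
      rw [if_neg hne]
  rw [hfun, PySem.List.foldl_append_eq_flatMap]
  rfl

-- ===== VERDICT (by name: the statement is the Claim_ definition above) =====
theorem parseAndSort_spec : Claim_equal_parseAndSort := by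
  intro words _
  unfold Spec_parseAndSort parseAndSort parseAndSort_alt
  simp only [alt_tokens_eq]
  refine (PySem.List.sorted_id_eq_sorted_id_iff_perm _ _).mpr ?_
  have h := pLoop_perm words.length words.length words 0 (by omega) (by omega)
  simpa using h
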